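-- pv_equiv track=rewrite | github.com/kopsha/python-1o1 | solved_exercises/dani/tournament.py | tally_tournament
-- ===== SOURCE A (Python) =====
-- def sum_tuple(left, right):
--     """returns a new tuple with the sum of tuples element by element"""
--     return tuple(sum(value) for value in zip(left, right))
--
-- def tally_tournament(text):
--     """given all lines, computes the tournament scores and returns a dict
--     result dictionary:
--     "Dortmund": (3,  2,  1,  0,  7),
--     """
--     if not isinstance(text, str):
--         raise TypeError("Tournament data must be a string (text).")
--
--     lines = text.split()
--     stats = {}
--
--     for line in lines:
--         home_team, away_team, result = line.split(";")
--
--         if result == "win":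
--             current_home = (1, 1, 0, 0, 3)
--             current_away = (1, 0, 0, 1, 0)
--         elif result == "draw":
--             current_home = (1, 0, 1, 0, 1)
--             current_away = (1, 0, 1, 0, 1)
--         else:
--             current_home = (1, 0, 0, 1, 0)
--             current_away = (1, 1, 0, 0, 3)
--
--         stats[home_team] = sum_tuple(
--             stats.get(home_team, (0, 0, 0, 0, 0)), current_home
--         )
--         stats[away_team] = sum_tuple(
--             stats.get(away_team, (0, 0, 0, 0, 0)), current_away
--         )
--
--     return stats
-- ===== SOURCE B (Python) =====
-- def tally_tournament(text):
--     """Staged re-implementation: parse every match first, build the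
--     first-occurrence team order, then tally each team by scanning the
--     match list, deriving the tuple via matches=w+d+l and points=3*w+d."""
--     if not isinstance(text, str):
--         raise TypeError("Tournament data must be a string (text).")
--
--     matches = []
--     for line in text.split():
--         home, away, result = line.split(";")
--         matches.append((home, away, result))
--
--     order = []
--     for home, away, _ in matches:
--         if home not in order:
--             order.append(home)
--         if away not in order:
--             order.append(away)
--
--     stats = {}
--     for team in order:
--         w = d = l = 0
--         for home, away, result in matches:
--             if home == team:
--                 if result == "win":
--                     w += 1
--                 elif result == "draw":
--                     d += 1
--                 else:
--                     l += 1
--             if away == team: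
--                 if result == "win":
--                     l += 1
--                 elif result == "draw":
--                     d += 1
--                 else:
--                     w += 1
--         stats[team] = (w + d + l, w, d, l, 3 * w + d)
--     return stats
-- ===== Notes on version B (the rewrite author's own statement) =====
-- stated objective: alternative
-- what changed: Instead of one pass that accumulates 5-tuples in a dict by summing per match, B runs staged passes: parse all matches into a list, compute the first-occurrence team order, then for each team scan the whole match list counting wins/draws/losses and build the tuple with the closed forms matches=w+d+l and points=3*w+d.
-- outside the precondition, e.g. on tally_tournament(';'): A raises ValueError, B raises ValueError
import Mathlib
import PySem

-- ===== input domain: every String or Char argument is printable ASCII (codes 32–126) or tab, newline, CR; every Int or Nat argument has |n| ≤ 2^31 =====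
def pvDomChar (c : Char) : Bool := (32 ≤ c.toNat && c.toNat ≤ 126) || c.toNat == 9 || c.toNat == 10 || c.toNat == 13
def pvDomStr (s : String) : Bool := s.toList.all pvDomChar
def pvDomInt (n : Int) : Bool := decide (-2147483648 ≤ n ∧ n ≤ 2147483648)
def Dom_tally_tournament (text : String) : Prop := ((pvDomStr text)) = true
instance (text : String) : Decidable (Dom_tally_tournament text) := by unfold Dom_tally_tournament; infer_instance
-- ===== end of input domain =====

-- B replaces A's single-pass dict accumulation of 5-tuples by staged passes: parse all
-- matches, build the first-occurrence team order, then scan the match list once per team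
-- counting wins/draws/losses (objective: alternative; same return value).

-- ===== PORT A =====
def sum_tuple (left right : List Int) : List Int :=
  (left.zip right).map (fun v => [v.1, v.2].sum)

def tallyStepA (stats : PySem.Dict String (List Int)) (line : String) :
    PySem.Dict String (List Int) :=
  match PySem.Str.split? line ";" with
  | some [home_team, away_team, result] =>
      let current_home : List Int :=
        if result == "win" then [1, 1, 0, 0, 3]
        else if result == "draw" then [1, 0, 1, 0, 1]
        else [1, 0, 0, 1, 0]
      let current_away : List Int :=
        if result == "win" then [1, 0, 0, 1, 0]
        else if result == "draw" then [1, 0, 1, 0, 1]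
        else [1, 1, 0, 0, 3]
      let stats := stats.insert home_team
        (sum_tuple (stats.getD home_team [0, 0, 0, 0, 0]) current_home)
      stats.insert away_team
        (sum_tuple (stats.getD away_team [0, 0, 0, 0, 0]) current_away)
  | _ => stats  -- unreachable under Pre_ (Python raises ValueError on unpack)

def tally_tournament (text : String) : List (String × List Int) :=
  ((PySem.Str.split₀ text).foldl tallyStepA PySem.Dict.empty).items

-- ===== PORT B =====
-- line.split(";") unpacked into three names; none = the unpack raises, unreachable under Pre_
def parseMatch? (line : String) : Option (String × String × String) :=
  match PySem.Str.split? line ";" with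
  | some [home, away, result] => some (home, away, result)
  | _ => none

def orderStep (order : List String) (m : String × String × String) : List String :=
  let order := if m.1 ∈ order then order else order ++ [m.1]
  if m.2.1 ∈ order then order else order ++ [m.2.1]

def countStep (team : String) (c : Int × Int × Int) (m : String × String × String) :
    Int × Int × Int :=
  let c := if m.1 = team then
      (if m.2.2 == "win" then (c.1 + 1, c.2.1, c.2.2)
       else if m.2.2 == "draw" then (c.1, c.2.1 + 1, c.2.2)
       else (c.1, c.2.1, c.2.2 + 1))
    else c
  if m.2.1 = team then
      (if m.2.2 == "win" then (c.1, c.2.1, c.2.2 + 1)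
       else if m.2.2 == "draw" then (c.1, c.2.1 + 1, c.2.2)
       else (c.1 + 1, c.2.1, c.2.2))
    else c

def teamStats (ms : List (String × String × String)) (team : String) : List Int :=
  let c := ms.foldl (countStep team) (0, 0, 0)
  [c.1 + c.2.1 + c.2.2, c.1, c.2.1, c.2.2, 3 * c.1 + c.2.1]

def tally_tournament_alt (text : String) : List (String × List Int) :=
  let ms := (PySem.Str.split₀ text).filterMap parseMatch?
  let order := ms.foldl orderStep []
  order.map (fun team => (team, teamStats ms team))

-- ===== PRECONDITION & SPEC =====
-- Pre_ excludes texts with a whitespace token not containing exactly two ';':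
-- there line.split(";") does not unpack into three names and Python A raises ValueError.
def Pre_tally_tournament (text : String) : Prop :=
  ∀ w ∈ PySem.Str.split₀ text, ((PySem.Str.split? w ";").getD []).length = 3

instance (text : String) : Decidable (Pre_tally_tournament text) := by
  unfold Pre_tally_tournament; infer_instance

def pvWitness_tally_tournament : String := "a;b;win c;a;draw a;c;loss"

def Spec_tally_tournament (text : String) (out : List (String × List Int)) : Prop :=
  out = tally_tournament_alt text

instance (text : String) (out : List (String × List Int)) : Decidable (Spec_tally_tournament text out) := by
  unfold Spec_tally_tournament; infer_instance

-- ===== CLAIM (what is proved, stated in full; the proofs are below) =====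
def Claim_equal_tally_tournament : Prop :=
  ∀ (text : String), Dom_tally_tournament text → Pre_tally_tournament text →
    Spec_tally_tournament text (tally_tournament text)

-- ===== LEMMAS AND PROOFS =====

-- the triple-to-5-tuple closed form B applies
def fin5 (c : Int × Int × Int) : List Int :=
  [c.1 + c.2.1 + c.2.2, c.1, c.2.1, c.2.2, 3 * c.1 + c.2.1]

-- A's per-match step, on an already parsed match
def matchStepA (stats : PySem.Dict String (List Int)) (m : String × String × String) :
    PySem.Dict String (List Int) :=
  let current_home : List Int :=
    if m.2.2 == "win" then [1, 1, 0, 0, 3]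
    else if m.2.2 == "draw" then [1, 0, 1, 0, 1]
    else [1, 0, 0, 1, 0]
  let current_away : List Int :=
    if m.2.2 == "win" then [1, 0, 0, 1, 0]
    else if m.2.2 == "draw" then [1, 0, 1, 0, 1]
    else [1, 1, 0, 0, 3]
  let stats := stats.insert m.1 (sum_tuple (stats.getD m.1 [0, 0, 0, 0, 0]) current_home)
  stats.insert m.2.1 (sum_tuple (stats.getD m.2.1 [0, 0, 0, 0, 0]) current_away)

theorem tallyStepA_eq_matchStepA (d : PySem.Dict String (List Int)) (line : String) :
    tallyStepA d line =
      match parseMatch? line with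
      | some m => matchStepA d m
      | none => d := by
  unfold tallyStepA parseMatch? matchStepA
  rcases h : PySem.Str.split? line ";" with _ | ⟨_ | ⟨x, _ | ⟨y, _ | ⟨z, _ | _⟩⟩⟩⟩ <;> rfl

theorem foldl_tallyStepA (lines : List String) (d : PySem.Dict String (List Int)) :
    lines.foldl tallyStepA d = (lines.filterMap parseMatch?).foldl matchStepA d := by
  induction lines generalizing d with
  | nil => rfl
  | cons line rest ih =>
      rw [List.foldl_cons, tallyStepA_eq_matchStepA, List.filterMap_cons]
      cases parseMatch? line <;> simp [ih]

theorem keys_insert_mem (d : PySem.Dict String (List Int)) (k : String) (v : List Int) :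
    (d.insert k v).keys = if k ∈ d.keys then d.keys else d.keys ++ [k] := by
  by_cases h : k ∈ d.keys
  · rw [if_pos h]
    exact PySem.Dict.keys_insert_of_contains d v
      (by simp [PySem.Dict.contains_eq_decide_mem_keys, h])
  · rw [if_neg h]
    exact PySem.Dict.keys_insert_of_not_contains d v
      (by simp [PySem.Dict.contains_eq_decide_mem_keys, h])

theorem keys_matchStepA (d : PySem.Dict String (List Int)) (m : String × String × String) :
    (matchStepA d m).keys = orderStep d.keys m := by
  simp only [matchStepA, orderStep, keys_insert_mem]

theorem keys_foldl_matchStepA (ms : List (String × String × String))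
    (d : PySem.Dict String (List Int)) :
    (ms.foldl matchStepA d).keys = ms.foldl orderStep d.keys := by
  induction ms generalizing d with
  | nil => rfl
  | cons m rest ih => rw [List.foldl_cons, List.foldl_cons, ih, keys_matchStepA]

theorem nodup_keys_matchStepA (d : PySem.Dict String (List Int)) (m : String × String × String)
    (h : d.keys.Nodup) : (matchStepA d m).keys.Nodup := by
  unfold matchStepA
  exact PySem.Dict.nodup_keys_insert _ _ _ (PySem.Dict.nodup_keys_insert _ _ _ h)

theorem nodup_keys_foldl_matchStepA (ms : List (String × String × String))
    (d : PySem.Dict String (List Int)) (h : d.keys.Nodup) :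
    (ms.foldl matchStepA d).keys.Nodup := by
  induction ms generalizing d with
  | nil => exact h
  | cons m rest ih => exact ih _ (nodup_keys_matchStepA d m h)

theorem getD_matchStepA (d : PySem.Dict String (List Int)) (m : String × String × String)
    (t : String) (c : Int × Int × Int) (h : d.getD t [0, 0, 0, 0, 0] = fin5 c) :
    (matchStepA d m).getD t [0, 0, 0, 0, 0] = fin5 (countStep t c m) := by
  obtain ⟨hm, am, rm⟩ := m
  simp only [matchStepA, countStep, PySem.Dict.getD_insert]
  by_cases h2 : t = am
  · subst h2
    by_cases h1 : t = hm
    · subst h1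
      by_cases hw : rm = "win" <;> by_cases hd : rm = "draw" <;>
        simp [hw, hd, h, sum_tuple, fin5] <;> (try ring_nf) <;> (try simp)
    · by_cases hw : rm = "win" <;> by_cases hd : rm = "draw" <;>
        simp [h1, Ne.symm h1, hw, hd, h, sum_tuple, fin5] <;> (try ring_nf) <;> (try simp)
  · by_cases h1 : t = hm
    · subst h1
      by_cases hw : rm = "win" <;> by_cases hd : rm = "draw" <;>
        simp [h2, Ne.symm h2, hw, hd, h, sum_tuple, fin5] <;> (try ring_nf) <;> (try simp)
    · simp [h1, h2, Ne.symm h1, Ne.symm h2, h]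

theorem getD_foldl_matchStepA (ms : List (String × String × String))
    (d : PySem.Dict String (List Int)) (t : String) (c : Int × Int × Int)
    (h : d.getD t [0, 0, 0, 0, 0] = fin5 c) :
    (ms.foldl matchStepA d).getD t [0, 0, 0, 0, 0] = fin5 (ms.foldl (countStep t) c) := by
  induction ms generalizing d c with
  | nil => exact h
  | cons m rest ih => exact ih _ _ (getD_matchStepA d m t c h)

-- ===== VERDICT (by name: the statement is the Claim_ definition above) =====
theorem tally_tournament_spec : Claim_equal_tally_tournament := by
  intro text _ _
  unfold Spec_tally_tournament tally_tournament tally_tournament_alt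
  rw [foldl_tallyStepA]
  set ms := (PySem.Str.split₀ text).filterMap parseMatch? with hms
  have hnd : (ms.foldl matchStepA PySem.Dict.empty).keys.Nodup :=
    nodup_keys_foldl_matchStepA ms _ (by simp [PySem.Dict.keys_empty])
  rw [PySem.Dict.items_eq_map_keys _ hnd [0, 0, 0, 0, 0], keys_foldl_matchStepA]
  have hkeys : (PySem.Dict.empty : PySem.Dict String (List Int)).keys = [] :=
    PySem.Dict.keys_empty
  rw [hkeys]
  apply List.map_congr_left
  intro t _
  congr 1
  rw [getD_foldl_matchStepA ms _ t (0, 0, 0) (by simp [PySem.Dict.getD_empty, fin5])]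
  rfl
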